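-- pv_equiv track=rewrite | github.com/AshtonRagan/cs-sprint-challenge-hash-tables | hashtables/ex4/ex4.py | has_negatives
-- ===== SOURCE A (Python) =====
-- def has_negatives(a):
--     """
--     YOUR CODE HERE
--     """
--     # Your code here
--     d = {}
--     r = []
--     for i in a:
--         if i not in d:
--             d[i] = 1
--             d[-i] = 1
--         else:
--             if i < 0:
--                 r.append(-i)
--             else:
--                 r.append(i)
--     return r
-- ===== SOURCE B (Python) =====
-- def has_negatives(a):
--     # Two staged passes over the magnitudes: record each magnitude's first-occurrence
--     # index, then emit a magnitude at every position strictly after its first occurrence.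
--     mags = [x if x >= 0 else -x for x in a]
--     first = {}
--     for k, m in enumerate(mags):
--         if m not in first:
--             first[m] = k
--     return [m for k, m in enumerate(mags) if first[m] < k]
-- ===== Notes on version B (the rewrite author's own statement) =====
-- stated objective: alternative
-- what changed: Replaces A's on-line scan with a negation-closed dict by two staged passes over the magnitude list: build a first-occurrence index map, then emit each magnitude at every position strictly after its first occurrence.
import Mathlib
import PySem

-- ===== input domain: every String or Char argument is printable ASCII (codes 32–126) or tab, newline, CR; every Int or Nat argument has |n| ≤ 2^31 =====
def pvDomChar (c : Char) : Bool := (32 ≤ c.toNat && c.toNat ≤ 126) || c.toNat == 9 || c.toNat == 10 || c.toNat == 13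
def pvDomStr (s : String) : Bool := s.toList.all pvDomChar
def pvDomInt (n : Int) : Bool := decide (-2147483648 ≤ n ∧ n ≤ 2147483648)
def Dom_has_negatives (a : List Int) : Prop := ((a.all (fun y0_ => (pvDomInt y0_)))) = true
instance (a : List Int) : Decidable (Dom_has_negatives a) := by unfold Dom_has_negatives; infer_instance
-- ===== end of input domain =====

-- B replaces A's one-pass negation-closed dict with two staged passes over the magnitude
-- list: a first-occurrence index map, then emission at positions after the first occurrence (alternative).

-- ===== PORT A =====
def has_negatives (a : List Int) : List Int :=
  (a.foldl (fun (st : PySem.Dict Int Int × List Int) i =>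
      if !(st.1.contains i) then
        ((st.1.insert i 1).insert (-i) 1, st.2)
      else if i < 0 then
        (st.1, st.2 ++ [-i])
      else
        (st.1, st.2 ++ [i]))
    (PySem.Dict.empty, [])).2

-- ===== PORT B =====
-- `first[m]` in Source B is ported as getD with default 0: the key is always present at that
-- point (every m comes from mags, over which `first` was just built), so the default is never used.
def has_negatives_alt (a : List Int) : List Int :=
  let mags := a.map (fun x => if 0 ≤ x then x else -x)
  let first := (PySem.List.enumerate mags).foldl
      (fun (d : PySem.Dict Int Int) (p : Int × Int) =>
        if !(d.contains p.2) then d.insert p.2 p.1 else d) PySem.Dict.empty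
  (PySem.List.enumerate mags).foldl
      (fun (r : List Int) (p : Int × Int) =>
        if first.getD p.2 0 < p.1 then r ++ [p.2] else r) []

-- ===== PRECONDITION & SPEC =====
def Spec_has_negatives (a : List Int) (out : List Int) : Prop := out = has_negatives_alt a
instance (a : List Int) (out : List Int) : Decidable (Spec_has_negatives a out) := by unfold Spec_has_negatives; infer_instance

-- ===== CLAIM (what is proved, stated in full; the proofs are below) =====
def Claim_equal_has_negatives : Prop := ∀ (a : List Int), Dom_has_negatives a → Spec_has_negatives a (has_negatives a)

-- ===== LEMMAS AND PROOFS =====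

-- magnitude, as B computes it
def pvMag (x : Int) : Int := if 0 ≤ x then x else -x

-- common reference: walk the magnitude list with the prefix processed so far,
-- emitting each magnitude already present in the prefix
def pvH : List Int → List Int → List Int
  | [], _ => []
  | m :: t, p => (if m ∈ p then [m] else []) ++ pvH t (p ++ [m])

theorem pvMag_eq_ite_neg (i : Int) : (if i < 0 then -i else i) = pvMag i := by
  unfold pvMag; split_ifs <;> omega

theorem pvMag_eq_iff (x i : Int) : pvMag x = pvMag i ↔ x = i ∨ x = -i := by
  unfold pvMag; split_ifs <;> omega

-- A's loop, against pvH: the dict's key set is the negation closure of the prefix's magnitudes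
theorem hasneg_A_loop (rest : List Int) :
    ∀ (d : PySem.Dict Int Int) (r p : List Int),
    (∀ x : Int, d.contains x = decide (pvMag x ∈ p)) →
    (rest.foldl (fun (st : PySem.Dict Int Int × List Int) i =>
        if !(st.1.contains i) then
          ((st.1.insert i 1).insert (-i) 1, st.2)
        else if i < 0 then
          (st.1, st.2 ++ [-i])
        else
          (st.1, st.2 ++ [i]))
      (d, r)).2 = r ++ pvH (rest.map pvMag) p := by
  induction rest with
  | nil => intro d r p _; simp [pvH]
  | cons i t ih =>
    intro d r p hinv
    simp only [List.foldl_cons, List.map_cons, pvH]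
    by_cases hc : d.contains i = true
    · have hm : pvMag i ∈ p := by have := hinv i; rw [hc] at this; simpa using this.symm
      simp only [hc, Bool.not_true, Bool.false_eq_true, if_false]
      have hinv' : ∀ x : Int, d.contains x = decide (pvMag x ∈ p ++ [pvMag i]) := by
        intro x; rw [hinv x]
        by_cases hx : pvMag x ∈ p
        · simp [hx]
        · have : pvMag x ∉ p ++ [pvMag i] := by
            simp only [List.mem_append, List.mem_singleton]
            rintro (h | h)
            · exact hx h
            · exact hx (h ▸ hm)
          simp [hx, this]
      rw [show (if i < 0 then (d, r ++ [-i]) else (d, r ++ [i])) = (d, r ++ [if i < 0 then -i else i]) by split_ifs <;> rfl]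
      rw [ih d _ _ hinv', pvMag_eq_ite_neg, if_pos hm]
      simp
    · have hcF : d.contains i = false := by simpa using hc
      have hnm : pvMag i ∉ p := by
        have := hinv i; rw [hcF] at this
        simpa using this.symm
      simp only [hcF, Bool.not_false, if_true]
      rw [ih _ _ (p ++ [pvMag i]), if_neg hnm]
      · simp
      · intro x
        rw [PySem.Dict.contains_insert, PySem.Dict.contains_insert, hinv x]
        by_cases h1 : x = i
        · subst h1; simp
        · by_cases h2 : x = -i
          · subst h2
            have hmm : pvMag (-i) = pvMag i := (pvMag_eq_iff (-i) i).mpr (Or.inr rfl)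
            simp [hmm]
          · have e1 : (x == -i) = false := beq_eq_false_iff_ne.mpr h2
            have e2 : (x == i) = false := beq_eq_false_iff_ne.mpr h1
            have h3 : pvMag x ≠ pvMag i := by
              intro h; rcases (pvMag_eq_iff x i).mp h with h | h
              exacts [h1 h, h2 h]
            rw [e1, e2]
            simp [h3]

-- the first-occurrence dict: lookups are first-occurrence indices (offset by the start index)
theorem hasneg_build_first (l : List Int) :
    ∀ (n : Int) (d : PySem.Dict Int Int) (m : Int),
    ((PySem.List.enumerate l n).foldl
        (fun (d : PySem.Dict Int Int) (p : Int × Int) =>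
          if !(d.contains p.2) then d.insert p.2 p.1 else d) d).get? m =
      match d.get? m with
      | some v => some v
      | none => if m ∈ l then some (n + (l.idxOf m : Int)) else none := by
  induction l with
  | nil => intro n d m; cases h : d.get? m <;> simp [PySem.List.enumerate_nil, h]
  | cons x t ih =>
    intro n d m
    rw [PySem.List.enumerate_cons, List.foldl_cons]
    by_cases hc : d.contains x = true
    · simp only [hc, Bool.not_true, Bool.false_eq_true, if_false]
      rw [ih (n + 1) d m]
      cases hdm : d.get? m with
      | some v => rfl
      | none =>
        have hmx : m ≠ x := by
          intro h; subst h
          rw [PySem.Dict.contains_eq_isSome_get?, hdm] at hc; simp at hc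
        have hxm : x ≠ m := fun h => hmx h.symm
        by_cases hmt : m ∈ t
        · have hstep : (List.idxOf m (x :: t) : Int) = (List.idxOf m t : Int) + 1 := by
            rw [List.idxOf_cons_ne _ hxm]; push_cast; ring
          simp only [List.mem_cons, hmt, or_true, if_true, hstep]
          ring_nf
        · simp [hmt, hmx]
    · have hcF : d.contains x = false := by simpa using hc
      simp only [hcF, Bool.not_false, if_true]
      rw [ih (n + 1) (d.insert x n) m]
      by_cases hmx : m = x
      · subst hmx
        rw [PySem.Dict.get?_insert_self]
        have : d.get? m = none := by
          rw [PySem.Dict.contains_eq_isSome_get?] at hcF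
          cases h : d.get? m <;> simp [h] at hcF ⊢
        simp [this, List.idxOf_cons_eq _ rfl]
      · rw [PySem.Dict.get?_insert, if_neg hmx]
        cases hdm : d.get? m with
        | some v => rfl
        | none =>
          have hxm : x ≠ m := fun h => hmx h.symm
          by_cases hmt : m ∈ t
          · have hstep : (List.idxOf m (x :: t) : Int) = (List.idxOf m t : Int) + 1 := by
              rw [List.idxOf_cons_ne _ hxm]; push_cast; ring
            simp only [List.mem_cons, hmt, or_true, if_true, hstep, hmx]
            ring_nf
          · simp [hmt, hmx]

-- B's second pass, against pvH
theorem hasneg_B_loop (mags : List Int) (first : PySem.Dict Int Int)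
    (hfirst : ∀ m, m ∈ mags → first.getD m 0 = (mags.idxOf m : Int)) :
    ∀ (rest pref : List Int) (r : List Int), mags = pref ++ rest →
    ((PySem.List.enumerate rest (pref.length : Int)).foldl
        (fun (r : List Int) (p : Int × Int) =>
          if first.getD p.2 0 < p.1 then r ++ [p.2] else r) r) = r ++ pvH rest pref := by
  intro rest
  induction rest with
  | nil => intro pref r _; simp [PySem.List.enumerate_nil, pvH]
  | cons m t ih =>
    intro pref r hsplit
    rw [PySem.List.enumerate_cons, List.foldl_cons]
    have hmem : m ∈ mags := by rw [hsplit]; simp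
    have hidx : first.getD m 0 = (mags.idxOf m : Int) := hfirst m hmem
    have hpre : pref <+: mags := ⟨m :: t, hsplit.symm⟩
    have hkey : (first.getD m 0 < (pref.length : Int)) ↔ m ∈ pref := by
      rw [hidx]
      constructor
      · intro h
        exact (hpre.mem_iff_idxOf_lt_length m).mpr (by exact_mod_cast h)
      · intro h
        exact_mod_cast (hpre.mem_iff_idxOf_lt_length m).mp h
    have hsplit' : mags = (pref ++ [m]) ++ t := by simp [hsplit]
    have hlen : (pref.length : Int) + 1 = ((pref ++ [m]).length : Int) := by
      simp [List.length_append]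
    by_cases hmp : m ∈ pref
    · rw [if_pos (hkey.mpr hmp), hlen, ih (pref ++ [m]) (r ++ [m]) hsplit']
      simp [pvH, hmp]
    · rw [if_neg (fun h => hmp (hkey.mp h)), hlen, ih (pref ++ [m]) r hsplit']
      simp [pvH, hmp]

-- ===== VERDICT (by name: the statement is the Claim_ definition above) =====
theorem has_negatives_spec : Claim_equal_has_negatives := by
  intro a _
  unfold Spec_has_negatives has_negatives has_negatives_alt
  have hA := hasneg_A_loop a PySem.Dict.empty [] []
    (by intro x; simp [PySem.Dict.contains_empty])
  rw [hA]
  have hmap : a.map (fun x => if 0 ≤ x then x else -x) = a.map pvMag := rfl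
  rw [hmap]
  set mags := a.map pvMag with hmags
  have hfirst : ∀ m, m ∈ mags →
      ((PySem.List.enumerate mags 0).foldl
        (fun (d : PySem.Dict Int Int) (p : Int × Int) =>
          if !(d.contains p.2) then d.insert p.2 p.1 else d) PySem.Dict.empty).getD m 0 =
      (mags.idxOf m : Int) := by
    intro m hm
    rw [PySem.Dict.getD_eq_get?_getD, hasneg_build_first mags 0 PySem.Dict.empty m]
    simp [PySem.Dict.get?_empty, hm]
  have hB := hasneg_B_loop mags _ hfirst mags [] [] (by simp)
  simp only [List.length_nil, Nat.cast_zero] at hB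
  rw [hB]
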